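-- pv_equiv track=rewrite | github.com/QuestNPC/NLP-Project | src/datamuseSentence.py | trigramSetIntersection
-- ===== SOURCE A (Python) =====
-- def trigramSetIntersection(set_list):
--     if len(set_list) < 2:
--         return set()
--     b_sections = []
--     i = 2
--     while i < len(set_list):
--         b_sections.append(set_list[i-2].intersection(set_list[i-1].intersection(set_list[i])))
--         i += 1
--     additions = set()
--     for isection in b_sections:
--         additions = additions.union(isection)
--     return additions
-- ===== SOURCE B (Python) =====
-- def trigramSetIntersection(set_list):
--     # Right-to-left sweep: for each position, a dict mapping element -> length of the
--     # consecutive run of sets containing it that starts at this position.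
--     streaks = []
--     nxt = {}
--     for s in reversed(set_list):
--         nxt = {x: nxt.get(x, 0) + 1 for x in s}
--         streaks.append(nxt)
--     streaks.reverse()
--     additions = set()
--     for s, d in zip(set_list, streaks):
--         additions.update(x for x in s if d[x] >= 3)
--     return additions
-- ===== Notes on version B (the rewrite author's own statement) =====
-- stated objective: alternative
-- what changed: Replaced the per-window triple set intersections and the separate union loop by a right-to-left sweep maintaining a dict of consecutive-containment run lengths (streaks), then one left-to-right pass collecting elements whose streak reaches 3.
import Mathlib
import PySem

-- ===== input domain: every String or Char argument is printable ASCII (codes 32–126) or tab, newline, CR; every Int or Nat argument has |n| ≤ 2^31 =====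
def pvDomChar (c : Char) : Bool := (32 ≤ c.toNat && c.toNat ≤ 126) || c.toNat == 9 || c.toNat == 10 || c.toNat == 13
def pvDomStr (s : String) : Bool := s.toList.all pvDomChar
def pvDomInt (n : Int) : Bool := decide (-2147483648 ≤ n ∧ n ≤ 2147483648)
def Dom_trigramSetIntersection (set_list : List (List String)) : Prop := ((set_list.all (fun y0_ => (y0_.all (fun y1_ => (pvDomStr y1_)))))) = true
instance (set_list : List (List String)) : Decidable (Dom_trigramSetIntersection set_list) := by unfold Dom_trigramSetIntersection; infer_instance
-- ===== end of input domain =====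

-- B replaces A's per-window triple intersections + union loop by a streak-dict sweep:
-- run lengths of consecutive containment, computed right-to-left, then one collecting pass (alternative algorithm, same cost; return value only — no mutation).

-- ===== PORT A =====
def trigramSetIntersection (set_list : List (List String)) : List String :=
  if set_list.length < 2 then PySem.Set.empty
  else
    -- while i < len(set_list): b_sections.append(set_list[i-2] & (set_list[i-1] & set_list[i])); i += 1
    let b_sections : List (List String) :=
      (PySem.List.pyRange 2 (set_list.length : Int) 1).foldl
        (fun bs i =>
          bs ++ [PySem.Set.inter (PySem.List.pyGetD set_list (i - 2) [])
                  (PySem.Set.inter (PySem.List.pyGetD set_list (i - 1) [])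
                    (PySem.List.pyGetD set_list i []))]) []
    -- for isection in b_sections: additions = additions.union(isection)
    b_sections.foldl (fun additions isection => PySem.Set.union additions isection) PySem.Set.empty

-- ===== PORT B =====
def trigramSetIntersection_alt (set_list : List (List String)) : List String :=
  -- for s in reversed(set_list): nxt = {x: nxt.get(x, 0) + 1 for x in s}; streaks.append(nxt)
  let p :=
    set_list.reverse.foldl
      (fun (acc : List (PySem.Dict String Int) × PySem.Dict String Int) s =>
        let nxt := s.foldl (fun d x => d.insert x (acc.2.getD x 0 + 1)) PySem.Dict.empty
        (acc.1 ++ [nxt], nxt))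
      ([], PySem.Dict.empty)
  -- streaks.reverse()
  let streaks := p.1.reverse
  -- for s, d in zip(set_list, streaks): additions.update(x for x in s if d[x] >= 3)
  -- d[x] is exact as getD: every x drawn from s is a key of d (d was built from s), so it never raises
  (set_list.zip streaks).foldl
    (fun additions sd =>
      PySem.Set.update additions (sd.1.filter (fun x => decide (3 ≤ sd.2.getD x 0))))
    PySem.Set.empty

-- ===== PRECONDITION & SPEC =====
def Spec_trigramSetIntersection (set_list : List (List String)) (out : List String) : Prop := out = trigramSetIntersection_alt set_list
instance (set_list : List (List String)) (out : List String) : Decidable (Spec_trigramSetIntersection set_list out) := by unfold Spec_trigramSetIntersection; infer_instance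

-- ===== CLAIM (what is proved, stated in full; the proofs are below) =====
def Claim_equal_trigramSetIntersection : Prop := ∀ (set_list : List (List String)), Dom_trigramSetIntersection set_list → Spec_trigramSetIntersection set_list (trigramSetIntersection set_list)

-- ===== LEMMAS AND PROOFS =====

-- the streak dict of xs, defined straightforwardly from the right
def pvDictOf (xs : List (List String)) : PySem.Dict String Int :=
  match xs with
  | [] => PySem.Dict.empty
  | s :: rest => s.foldl (fun d x => d.insert x ((pvDictOf rest).getD x 0 + 1)) PySem.Dict.empty

def pvStreaksOf (xs : List (List String)) : List (PySem.Dict String Int) :=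
  match xs with
  | [] => []
  | s :: rest => pvDictOf (s :: rest) :: pvStreaksOf rest

-- run length of consecutive sets containing y, from the front of xs
def pvRunLen (xs : List (List String)) (y : String) : Int :=
  match xs with
  | [] => 0
  | s :: rest => if y ∈ s then pvRunLen rest y + 1 else 0

lemma pvRunLen_nonneg (xs : List (List String)) (y : String) : 0 ≤ pvRunLen xs y := by
  induction xs with
  | nil => simp [pvRunLen]
  | cons s rest ih => simp only [pvRunLen]; split_ifs <;> omega

-- B's reverse fold produces exactly (streaks reversed, dict of the whole list)
lemma fold_rev_eq (xs : List (List String)) :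
    xs.reverse.foldl
      (fun (acc : List (PySem.Dict String Int) × PySem.Dict String Int) s =>
        let nxt := s.foldl (fun d x => d.insert x (acc.2.getD x 0 + 1)) PySem.Dict.empty
        (acc.1 ++ [nxt], nxt))
      ([], PySem.Dict.empty)
    = ((pvStreaksOf xs).reverse, pvDictOf xs) := by
  induction xs with
  | nil => simp [pvStreaksOf, pvDictOf]
  | cons s rest ih =>
      simp only [List.reverse_cons, List.foldl_append, ih, List.foldl_cons, List.foldl_nil]
      simp [pvStreaksOf, pvDictOf]

-- lookup in the dict built from s over base d
lemma getD_build (s : List String) (d : PySem.Dict String Int) (y : String) :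
    (s.foldl (fun d2 x => d2.insert x (d.getD x 0 + 1)) PySem.Dict.empty).getD y 0
      = if y ∈ s then d.getD y 0 + 1 else 0 := by
  have h : ∀ (acc : PySem.Dict String Int),
      (s.foldl (fun d2 x => d2.insert x (d.getD x 0 + 1)) acc).getD y 0
        = if y ∈ s then d.getD y 0 + 1 else acc.getD y 0 := by
    induction s with
    | nil => intro acc; simp
    | cons a s ih =>
        intro acc
        simp only [List.foldl_cons, ih, List.mem_cons]
        by_cases hy : y ∈ s
        · simp [hy]
        · by_cases hya : y = a <;> simp [hy, hya, PySem.Dict.getD_insert]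
  simpa [PySem.Dict.getD_empty] using h PySem.Dict.empty

lemma getD_pvDictOf (xs : List (List String)) (y : String) :
    (pvDictOf xs).getD y 0 = pvRunLen xs y := by
  induction xs with
  | nil => simp [pvDictOf, pvRunLen, PySem.Dict.getD_empty]
  | cons s rest ih => simp [pvDictOf, pvRunLen, getD_build, ih]

-- membership in a binary intersection, as a boolean filter
lemma inter_assoc_filter (a b c : List String) :
    PySem.Set.inter a (PySem.Set.inter b c)
      = a.filter (fun x => PySem.Set.contains b x && PySem.Set.contains c x) := by
  unfold PySem.Set.inter
  apply List.filter_congr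
  intro x _
  by_cases hb : x ∈ b <;> by_cases hc : x ∈ c <;>
    simp [PySem.Set.contains, List.mem_filter, hb, hc]

-- A's index-window map equals the zip-window map
lemma windows_eq (xs : List (List String)) :
    (PySem.List.pyRange 2 (xs.length : Int) 1).map
      (fun i => PySem.Set.inter (PySem.List.pyGetD xs (i - 2) [])
        (PySem.Set.inter (PySem.List.pyGetD xs (i - 1) []) (PySem.List.pyGetD xs i [])))
    = (xs.zip ((xs.drop 1).zip (xs.drop 2))).map
        (fun w => w.1.filter (fun x => PySem.Set.contains w.2.1 x && PySem.Set.contains w.2.2 x)) := by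
  apply List.ext_getElem
  · simp [PySem.List.length_pyRange_one]
    omega
  · intro k h1 h2
    have hk : k + 2 < xs.length := by
      simp [List.length_zip] at h2
      omega
    simp only [List.getElem_map, List.getElem_zip, List.getElem_drop]
    rw [PySem.List.getElem_pyRange_one]
    have e1 : (2 + (k : Int) - 2) = ((k : Nat) : Int) := by omega
    have e2 : (2 + (k : Int) - 1) = (((1 + k : Nat)) : Int) := by push_cast; ring
    have e3 : (2 + (k : Int)) = (((2 + k : Nat)) : Int) := by push_cast; ring
    rw [e1, e2, e3, PySem.List.pyGetD_natCast, PySem.List.pyGetD_natCast,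
      PySem.List.pyGetD_natCast]
    rw [List.getD_eq_getElem xs [] (by omega), List.getD_eq_getElem xs [] (by omega),
      List.getD_eq_getElem xs [] (by omega)]
    rw [inter_assoc_filter]

-- folding `union`/`update` accumulates exactly the flattened elements
lemma foldl_union_eq_update (L : List (List String)) (s : PySem.Set String) :
    L.foldl (fun additions isection => PySem.Set.union additions isection) s
      = PySem.Set.update s L.flatten := by
  induction L generalizing s with
  | nil => simp [PySem.Set.update]
  | cons l L ih =>
      simp only [List.foldl_cons, List.flatten_cons, PySem.Set.update_append, ih]
      rfl

lemma foldl_update_eq_update {α : Type} (f : α → List String) (L : List α) (s : PySem.Set String) :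
    L.foldl (fun additions a => PySem.Set.update additions (f a)) s
      = PySem.Set.update s (L.map f).flatten := by
  induction L generalizing s with
  | nil => simp [PySem.Set.update]
  | cons l L ih =>
      simp only [List.foldl_cons, List.map_cons, List.flatten_cons, PySem.Set.update_append, ih]

-- streak run lengths are bounded by the list length
lemma pvRunLen_le_length (xs : List (List String)) (y : String) :
    pvRunLen xs y ≤ (xs.length : Int) := by
  induction xs with
  | nil => simp [pvRunLen]
  | cons s rest ih => simp only [pvRunLen, List.length_cons]; split_ifs <;> (push_cast; omega)

-- with fewer than 2 following sets no streak can reach 3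
lemma filter_streak_short (s : List String) (rest : List (List String)) (h : rest.length ≤ 1) :
    s.filter (fun x => decide (3 ≤ (pvDictOf (s :: rest)).getD x 0)) = [] := by
  rw [List.filter_eq_nil_iff]
  intro x _
  have hb := pvRunLen_le_length (s :: rest) x
  simp only [List.length_cons] at hb
  simp only [getD_pvDictOf, decide_eq_true_eq]
  push_cast at hb
  omega

-- with at least 2 following sets, streak ≥ 3 means membership in the next two sets
lemma filter_streak_long (s t u : List String) (r : List (List String)) :
    s.filter (fun x => decide (3 ≤ (pvDictOf (s :: t :: u :: r)).getD x 0))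
      = s.filter (fun x => PySem.Set.contains t x && PySem.Set.contains u x) := by
  apply List.filter_congr
  intro x hx
  have h3 := pvRunLen_nonneg r x
  simp only [getD_pvDictOf, pvRunLen, if_pos hx, PySem.Set.contains]
  by_cases ht : x ∈ t <;> by_cases hu : x ∈ u <;> simp [ht, hu] <;> omega

-- the flattened addition sequences of A (windows) and B (streaks) coincide
lemma flat_eq (xs : List (List String)) :
    ((xs.zip (pvStreaksOf xs)).map
        (fun sd => sd.1.filter (fun x => decide (3 ≤ sd.2.getD x 0)))).flatten
    = ((xs.zip ((xs.drop 1).zip (xs.drop 2))).map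
        (fun w => w.1.filter (fun x => PySem.Set.contains w.2.1 x && PySem.Set.contains w.2.2 x))).flatten := by
  induction xs with
  | nil => simp [pvStreaksOf]
  | cons s rest ih =>
      match rest with
      | [] => simp [pvStreaksOf, filter_streak_short s [] (by simp)]
      | [t] =>
          simp [pvStreaksOf, filter_streak_short s [t] (by simp),
            filter_streak_short t [] (by simp)]
      | t :: u :: r =>
          simp only [pvStreaksOf, List.drop_succ_cons, List.drop_zero,
            List.zip_cons_cons, List.map_cons, List.flatten_cons] at *
          rw [filter_streak_long, ih]

-- ===== VERDICT (by name: the statement is the Claim_ definition above) =====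
theorem trigramSetIntersection_spec : Claim_equal_trigramSetIntersection := by
  intro set_list _
  unfold Spec_trigramSetIntersection trigramSetIntersection trigramSetIntersection_alt
  simp only [fold_rev_eq, List.reverse_reverse]
  rw [foldl_update_eq_update, flat_eq]
  by_cases h : set_list.length < 2
  · rw [if_pos h]
    have hz : set_list.drop 2 = [] := List.drop_eq_nil_of_le (by omega)
    simp [hz, PySem.Set.update, PySem.Set.empty]
  · rw [if_neg h]
    rw [PySem.List.foldl_append_singleton_eq_map, List.nil_append, windows_eq,
      foldl_union_eq_update]
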